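-- pv_equiv track=rewrite | github.com/gnikolaropoulos/AdventOfCode2022 | day07/main.py | folder_size
-- ===== SOURCE A (Python) =====
-- def folder_size(folder, folder_sizes, folder_tree):
--     if folder in folder_sizes:
--         return folder_sizes[folder]
--     size = 0
--     for item in folder_tree[folder]:
--         if item.startswith('dir '):
--             size += folder_size(folder + (item[4:],), folder_sizes, folder_tree)
--         else:
--             size += int(item.split(' ')[0])
--     folder_sizes[folder] = size
--     return size
-- ===== SOURCE B (Python) =====
-- def folder_size(folder, folder_sizes, folder_tree):
--     total = 0
--     stack = [folder]
--     while stack: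
--         cur = stack.pop()
--         if cur in folder_sizes:
--             total += folder_sizes[cur]
--         else:
--             for item in folder_tree[cur]:
--                 if item.startswith('dir '):
--                     stack.append(cur + (item[4:],))
--                 else:
--                     total += int(item.split(' ')[0])
--     return total
-- ===== Notes on version B (the rewrite author's own statement) =====
-- stated objective: alternative
-- what changed: Replaces A's memoized recursion (which writes computed sizes back into folder_sizes) with an iterative accumulator loop over an explicit work stack that only reads the pre-existing cache and never mutates it; since folder keys are full paths the memo writes cannot change any value read later, so the returned sum is identical.
-- outside the precondition, e.g. on folder_size(('/',), {}, {('/',): ['1 a'], ('/', 'x'): ['junk']}): A returns 1, B returns 1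
import Mathlib
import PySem

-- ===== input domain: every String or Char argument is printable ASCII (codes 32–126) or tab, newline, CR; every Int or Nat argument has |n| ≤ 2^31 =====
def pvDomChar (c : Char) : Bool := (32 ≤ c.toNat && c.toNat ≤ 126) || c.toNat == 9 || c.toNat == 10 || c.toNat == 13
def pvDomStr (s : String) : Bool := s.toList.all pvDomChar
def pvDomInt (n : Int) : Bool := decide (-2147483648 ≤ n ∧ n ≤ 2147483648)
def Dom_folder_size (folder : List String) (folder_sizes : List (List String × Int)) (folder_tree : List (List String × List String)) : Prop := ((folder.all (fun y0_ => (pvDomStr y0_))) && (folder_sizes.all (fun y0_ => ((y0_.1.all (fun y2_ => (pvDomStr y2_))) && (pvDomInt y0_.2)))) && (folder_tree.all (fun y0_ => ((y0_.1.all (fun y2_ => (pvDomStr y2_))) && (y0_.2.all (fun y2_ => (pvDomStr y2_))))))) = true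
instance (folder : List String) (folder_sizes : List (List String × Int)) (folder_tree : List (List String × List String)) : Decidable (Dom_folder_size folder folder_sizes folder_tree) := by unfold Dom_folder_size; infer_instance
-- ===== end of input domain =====

-- B replaces A's memoized recursion by an iterative accumulator loop over an explicit work stack that
-- only READS the pre-existing cache; equivalence is about the RETURN value only (A also writes the
-- computed sizes into folder_sizes, B leaves it untouched).

-- ===== PORT A =====
-- shared small helpers (exact Python semantics via PySem)
def pvIsDir (item : String) : Bool := PySem.Str.startswith item "dir "        -- item.startswith('dir ')
def pvChildName (item : String) : String := PySem.Str.slice item (some 4) none  -- item[4:]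
def pvParseItem (item : String) : Option Int :=                               -- int(item.split(' ')[0]); none = ValueError
  ((PySem.Str.split? item " ").bind (fun l => PySem.List.pyGet? l 0)).bind PySem.Int.ofStr?

-- A's recursion, fuel-guarded (the chain of keys has strictly growing length, so
-- maxKeyLen+2 fuel is never exhausted on inputs where the Python returns; none = KeyError/ValueError)
mutual
def goA (tree : List (List String × List String)) : Nat → List String → List (List String × Int) → Option (Int × List (List String × Int))
  | 0, _, _ => none
  | f+1, k, cache =>
    match List.lookup k cache with
    | some v => some (v, cache)                                   -- if folder in folder_sizes: return folder_sizes[folder]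
    | none =>
      match List.lookup k tree with
      | none => none                                              -- folder_tree[folder] raises KeyError
      | some items =>
        match goAItems tree f k items 0 cache with
        | none => none
        | some (s, c) => some (s, c ++ [(k, s)])                  -- folder_sizes[folder] = size; return size
termination_by f _ _ => (f, 0)
def goAItems (tree : List (List String × List String)) : Nat → List String → List String → Int → List (List String × Int) → Option (Int × List (List String × Int))
  | _, _, [], s, c => some (s, c)
  | f, k, item :: rest, s, c =>
    if pvIsDir item then
      match goA tree f (k ++ [pvChildName item]) c with
      | none => none
      | some (v, c') => goAItems tree f k rest (s + v) c'         -- size += folder_size(folder + (item[4:],), …)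
    else
      match pvParseItem item with
      | none => none
      | some n => goAItems tree f k rest (s + n) c                -- size += int(item.split(' ')[0])
termination_by f _ items _ _ => (f, items.length + 1)
end

def pvMaxKeyLen : List (List String × List String) → Nat
  | [] => 0
  | p :: r => max p.1.length (pvMaxKeyLen r)

def folder_size (folder : List String) (folder_sizes : List (List String × Int)) (folder_tree : List (List String × List String)) : Int :=
  ((goA folder_tree (pvMaxKeyLen folder_tree + 2) folder folder_sizes).map Prod.fst).getD 0

-- ===== PORT B =====
-- one pass over the items of the popped folder: files add to the running total, dirs are pushed
def stepItems (cur : List String) : List String → Int → List (List String) → Option (Int × List (List String))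
  | [], t, st => some (t, st)
  | item :: rest, t, st =>
    if pvIsDir item then
      stepItems cur rest t ((cur ++ [pvChildName item]) :: st)    -- stack.append(cur + (item[4:],))
    else
      match pvParseItem item with
      | none => none
      | some n => stepItems cur rest (t + n) st                   -- total += int(item.split(' ')[0])

-- the while-stack loop, fuel-guarded (fuel = an upper bound on the number of iterations)
def goB (sizes : List (List String × Int)) (tree : List (List String × List String)) : Nat → Int → List (List String) → Option Int
  | _, total, [] => some total                                    -- while stack: … ; return total
  | 0, _, _ :: _ => none
  | f+1, total, cur :: stack =>
    match List.lookup cur sizes with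
    | some v => goB sizes tree f (total + v) stack                -- if cur in folder_sizes: total += folder_sizes[cur]
    | none =>
      match List.lookup cur tree with
      | none => none                                              -- folder_tree[cur] raises KeyError
      | some items =>
        match stepItems cur items total stack with
        | none => none
        | some (total', stack') => goB sizes tree f total' stack'

def pvSumItems : List (List String × List String) → Nat
  | [] => 0
  | p :: r => p.2.length + pvSumItems r

def pvW (tree : List (List String × List String)) : Nat := 1 + pvSumItems tree

def pvBnd (w : Nat) : Nat → Nat
  | 0 => 0
  | f+1 => 1 + w * pvBnd w f

def folder_size_alt (folder : List String) (folder_sizes : List (List String × Int)) (folder_tree : List (List String × List String)) : Int :=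
  (goB folder_sizes folder_tree (pvBnd (pvW folder_tree) (pvMaxKeyLen folder_tree + 2)) 0 [folder]).getD 0

-- ===== PRECONDITION & SPEC =====
def pvAdm (sizes : List (List String × Int)) (tree : List (List String × List String)) (k : List String) : Bool :=
  (List.lookup k sizes).isSome || (List.lookup k tree).isSome

-- Pre_ excludes the inputs on which A raises (KeyError on a missing folder key, ValueError from int());
-- for checkability it conservatively requires EVERY tree entry below the requested folder to be
-- well-formed, which also excludes some inputs A returns on because the malformed entry is unreachable.
def Pre_folder_size (folder : List String) (folder_sizes : List (List String × Int)) (folder_tree : List (List String × List String)) : Prop :=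
  (List.lookup folder folder_sizes).isSome = true ∨
  ((List.lookup folder folder_tree).isSome = true ∧
    ∀ p ∈ folder_tree, folder <+: p.1 → ∀ item ∈ p.2,
      (pvIsDir item = true → pvAdm folder_sizes folder_tree (p.1 ++ [pvChildName item]) = true) ∧
      (pvIsDir item = false → (pvParseItem item).isSome = true))
instance (folder : List String) (folder_sizes : List (List String × Int)) (folder_tree : List (List String × List String)) : Decidable (Pre_folder_size folder folder_sizes folder_tree) := by unfold Pre_folder_size; infer_instance

def pvWitness_folder_size : List String × (List (List String × Int)) × (List (List String × List String)) :=
  (["/"], [], [(["/"], ["dir a", "10 b"]), (["/", "a"], ["5 x"])])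

def Spec_folder_size (folder : List String) (folder_sizes : List (List String × Int)) (folder_tree : List (List String × List String)) (out : Int) : Prop := out = folder_size_alt folder folder_sizes folder_tree
instance (folder : List String) (folder_sizes : List (List String × Int)) (folder_tree : List (List String × List String)) (out : Int) : Decidable (Spec_folder_size folder folder_sizes folder_tree out) := by unfold Spec_folder_size; infer_instance

-- ===== CLAIM (what is proved, stated in full; the proofs are below) =====
def Claim_equal_folder_size : Prop := ∀ (folder : List String) (folder_sizes : List (List String × Int)) (folder_tree : List (List String × List String)), Dom_folder_size folder folder_sizes folder_tree → Pre_folder_size folder folder_sizes folder_tree → Spec_folder_size folder folder_sizes folder_tree (folder_size folder folder_sizes folder_tree)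

-- ===== LEMMAS AND PROOFS =====

-- the common "pure" value: what the recursion computes reading ONLY the initial cache
mutual
def pureF (sizes : List (List String × Int)) (tree : List (List String × List String)) : Nat → List String → Option Int
  | 0, _ => none
  | f+1, k =>
    match List.lookup k sizes with
    | some v => some v
    | none =>
      match List.lookup k tree with
      | none => none
      | some items => pureItems sizes tree f k items 0
termination_by f _ => (f, 0)
def pureItems (sizes : List (List String × Int)) (tree : List (List String × List String)) : Nat → List String → List String → Int → Option Int
  | _, _, [], s => some s
  | f, k, item :: rest, s =>
    if pvIsDir item then
      match pureF sizes tree f (k ++ [pvChildName item]) with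
      | none => none
      | some v => pureItems sizes tree f k rest (s + v)
    else
      match pvParseItem item with
      | none => none
      | some n => pureItems sizes tree f k rest (s + n)
termination_by f _ items _ => (f, items.length + 1)
end

theorem pure_mono (sz : List (List String × Int)) (tr : List (List String × List String)) :
    ∀ f : Nat,
      (∀ k v, pureF sz tr f k = some v → pureF sz tr (f+1) k = some v) ∧
      (∀ k items s t, pureItems sz tr f k items s = some t → pureItems sz tr (f+1) k items s = some t) := by
  intro f
  induction f with
  | zero =>
    constructor
    · intro k v h; simp [pureF] at h
    · intro k items s t h
      induction items generalizing s t with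
      | nil => simpa [pureItems] using h
      | cons item rest ih =>
        by_cases hd : pvIsDir item = true
        · simp [pureItems, hd, pureF] at h
        · cases hp : pvParseItem item with
          | none => simp [pureItems, hd, hp] at h
          | some n =>
            simp only [pureItems, hd, hp] at h ⊢
            exact ih _ _ h
  | succ f ih =>
    have hF : ∀ k v, pureF sz tr (f+1) k = some v → pureF sz tr (f+2) k = some v := by
      intro k v h
      rw [show f+2 = (f+1)+1 from rfl]
      simp only [pureF] at h ⊢
      cases hsz : List.lookup k sz with
      | some w => simpa [hsz] using (by simpa [hsz] using h)
      | none =>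
        simp only [hsz] at h ⊢
        cases htr : List.lookup k tr with
        | none => simp [htr] at h
        | some items =>
          simp only [htr] at h ⊢
          exact ih.2 _ _ _ _ h
    refine ⟨hF, ?_⟩
    intro k items s t h
    induction items generalizing s t with
    | nil => simpa [pureItems] using h
    | cons item rest ihl =>
      by_cases hd : pvIsDir item = true
      · simp only [pureItems, hd] at h ⊢
        cases hc : pureF sz tr (f+1) (k ++ [pvChildName item]) with
        | none => simp [hc] at h
        | some v =>
          rw [hc] at h
          rw [hF _ _ hc]
          exact ihl _ _ h
      · cases hp : pvParseItem item with
        | none => simp [pureItems, hd, hp] at h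
        | some n =>
          simp only [pureItems, hd, hp] at h ⊢
          exact ihl _ _ h

theorem pureF_mono_le (sz : List (List String × Int)) (tr : List (List String × List String))
    {f g : Nat} (hfg : f ≤ g) {k : List String} {v : Int}
    (h : pureF sz tr f k = some v) : pureF sz tr g k = some v := by
  induction g, hfg using Nat.le_induction with
  | base => exact h
  | succ g hg ih => exact (pure_mono sz tr g).1 _ _ ih

theorem pureF_det (sz : List (List String × Int)) (tr : List (List String × List String))
    {f g : Nat} {k : List String} {v w : Int}
    (h1 : pureF sz tr f k = some v) (h2 : pureF sz tr g k = some w) : v = w := by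
  have a1 := pureF_mono_le sz tr (Nat.le_max_left f g) h1
  have a2 := pureF_mono_le sz tr (Nat.le_max_right f g) h2
  rw [a1] at a2; exact Option.some.inj a2

-- first-match lookup through an append
theorem pvLookup_append_some {β : Type} (c : List (List String × β)) (p : List String × β)
    {j : List String} {w : β} (h : List.lookup j c = some w) :
    List.lookup j (c ++ [p]) = some w := by
  induction c with
  | nil => simp [List.lookup] at h
  | cons q c ih =>
    simp only [List.cons_append]
    cases hb : j == q.1 with
    | false =>
      simp only [List.lookup, hb] at h ⊢
      exact ih h
    | true =>
      simp only [List.lookup, hb] at h ⊢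
      exact h

theorem pvLookup_append_none {β : Type} (c : List (List String × β)) (k : List String) (v : β)
    {j : List String} (h : List.lookup j c = none) :
    List.lookup j (c ++ [(k, v)]) = if (j == k) = true then some v else none := by
  induction c with
  | nil => cases hb : j == k <;> simp [List.lookup, hb]
  | cons q c ih =>
    cases hb : j == q.1 with
    | false =>
      simp only [List.lookup, hb] at h
      simp only [List.cons_append, List.lookup, hb]
      exact ih h
    | true => simp [List.lookup, hb] at h

-- cache invariants for A's run: every cache entry is a pure value, and the initial entries survive
def pvFaithful (sz : List (List String × Int)) (tr : List (List String × List String)) (c : List (List String × Int)) : Prop :=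
  ∀ k v, List.lookup k c = some v → ∃ f, pureF sz tr f k = some v
def pvSup (sz c : List (List String × Int)) : Prop :=
  ∀ (k : List String) (v : Int), List.lookup k sz = some v → List.lookup k c = some v

theorem goA_pure (sz : List (List String × Int)) (tr : List (List String × List String)) :
    ∀ (f : Nat) (k : List String) (v : Int) (c : List (List String × Int)),
      pureF sz tr f k = some v → pvFaithful sz tr c → pvSup sz c →
      ∃ c', goA tr f k c = some (v, c') ∧ pvFaithful sz tr c' ∧ pvSup sz c' := by
  intro f
  induction f with
  | zero => intro k v c h _ _; simp [pureF] at h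
  | succ f ih =>
    have hItems : ∀ (items : List String) (k : List String) (s t : Int) (c : List (List String × Int)),
        pureItems sz tr f k items s = some t → pvFaithful sz tr c → pvSup sz c →
        ∃ c', goAItems tr f k items s c = some (t, c') ∧ pvFaithful sz tr c' ∧ pvSup sz c' := by
      intro items
      induction items with
      | nil =>
        intro k s t c h hF hS
        simp only [pureItems, Option.some.injEq] at h
        exact ⟨c, by simp [goAItems, h], hF, hS⟩
      | cons item rest ihl =>
        intro k s t c h hF hS
        by_cases hd : pvIsDir item = true
        · simp only [pureItems, hd, if_true] at h
          cases hc : pureF sz tr f (k ++ [pvChildName item]) with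
          | none => simp [hc] at h
          | some v' =>
            simp only [hc] at h
            obtain ⟨c1, hgo, hF1, hS1⟩ := ih _ v' c hc hF hS
            obtain ⟨c2, hgo2, hF2, hS2⟩ := ihl k (s + v') t c1 h hF1 hS1
            exact ⟨c2, by simp [goAItems, hd, hgo, hgo2], hF2, hS2⟩
        · cases hp : pvParseItem item with
          | none => simp [pureItems, hd, hp] at h
          | some n =>
            simp only [pureItems, hd, hp, Bool.false_eq_true, if_false] at h
            obtain ⟨c2, hgo2, hF2, hS2⟩ := ihl k (s + n) t c h hF hS
            exact ⟨c2, by simp [goAItems, hd, hp, hgo2], hF2, hS2⟩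
    intro k v c h hF hS
    have hv : pureF sz tr (f+1) k = some v := h
    simp only [pureF] at h
    cases hcz : List.lookup k c with
    | some w =>
      obtain ⟨g, hg⟩ := hF k w hcz
      have hwv : w = v := pureF_det sz tr hg hv
      exact ⟨c, by simp [goA, hcz, hwv], hF, hS⟩
    | none =>
      cases hsz : List.lookup k sz with
      | some v0 =>
        have := hS k v0 hsz
        rw [hcz] at this; cases this
      | none =>
        simp only [hsz] at h
        cases htr : List.lookup k tr with
        | none => simp [htr] at h
        | some items =>
          simp only [htr] at h
          obtain ⟨c1, hgo, hF1, hS1⟩ := hItems items k 0 v c h hF hS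
          refine ⟨c1 ++ [(k, v)], by simp [goA, hcz, htr, hgo], ?_, ?_⟩
          · intro j w hj
            cases hj1 : List.lookup j c1 with
            | some w1 =>
              rw [pvLookup_append_some c1 (k, v) hj1] at hj
              injection hj with h'
              exact hF1 j w (by rw [hj1, h'])
            | none =>
              rw [pvLookup_append_none c1 k v hj1] at hj
              by_cases hb : (j == k) = true
              · simp only [hb, if_true, Option.some.injEq] at hj
                subst hj
                exact ⟨f+1, by rwa [show j = k from by simpa using hb]⟩
              · simp [hb] at hj
          · intro j w hj
            exact pvLookup_append_some c1 (k, v) (hS1 j w hj)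

theorem pvSumItems_le (tr : List (List String × List String)) :
    ∀ {k : List String} {items : List String}, (k, items) ∈ tr → items.length ≤ pvSumItems tr := by
  intro k items h
  induction tr with
  | nil => simp at h
  | cons p r ih =>
    rcases List.mem_cons.mp h with h1 | h2
    · subst h1; simp [pvSumItems]
    · have := ih h2; simp [pvSumItems]; omega

theorem pvMaxKeyLen_mem (tr : List (List String × List String)) :
    ∀ {k : List String} {items : List String}, (k, items) ∈ tr → k.length ≤ pvMaxKeyLen tr := by
  intro k items h
  induction tr with
  | nil => simp at h
  | cons p r ih =>
    rcases List.mem_cons.mp h with h1 | h2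
    · subst h1; simp [pvMaxKeyLen]
    · have := ih h2; simp [pvMaxKeyLen]; omega

theorem pvLookup_mem {β : Type} : ∀ {l : List (List String × β)} {k : List String} {v : β},
    List.lookup k l = some v → (k, v) ∈ l := by
  intro l
  induction l with
  | nil => intro k v h; simp [List.lookup] at h
  | cons p r ih =>
    intro k v h
    cases hb : k == p.1 with
    | true =>
      have hk : k = p.1 := by simpa using hb
      simp only [List.lookup, hb, Option.some.injEq] at h
      rw [hk, ← h]
      exact List.mem_cons_self ..
    | false =>
      simp only [List.lookup, hb] at h
      exact List.mem_cons_of_mem _ (ih h)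

-- B: a key with a pure value costs at most pvBnd fuel loop iterations and adds exactly its value
theorem goB_pure (sz : List (List String × Int)) (tr : List (List String × List String)) :
    ∀ (f : Nat) (k : List String) (v : Int), pureF sz tr f k = some v →
      ∃ c, c ≤ pvBnd (pvW tr) f ∧
        ∀ (m : Nat) (total : Int) (stack : List (List String)),
          goB sz tr (c + m) total (k :: stack) = goB sz tr m (total + v) stack := by
  intro f
  induction f with
  | zero => intro k v h; simp [pureF] at h
  | succ f ih =>
    have hItems : ∀ (items : List String) (k : List String) (s t : Int),
        pureItems sz tr f k items s = some t →
        ∃ c, c ≤ items.length * pvBnd (pvW tr) f ∧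
          ∀ (total : Int) (stack : List (List String)),
            ∃ p, stepItems k items total stack = some p ∧
              ∀ m, goB sz tr (c + m) p.1 p.2 = goB sz tr m (total + (t - s)) stack := by
      intro items
      induction items with
      | nil =>
        intro k s t h
        simp only [pureItems, Option.some.injEq] at h
        subst h
        refine ⟨0, by simp, ?_⟩
        intro total stack
        refine ⟨(total, stack), by simp [stepItems], ?_⟩
        intro m
        simp
      | cons item rest ihl =>
        intro k s t h
        by_cases hd : pvIsDir item = true
        · simp only [pureItems, hd, if_true] at h
          cases hc : pureF sz tr f (k ++ [pvChildName item]) with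
          | none => simp [hc] at h
          | some v' =>
            simp only [hc] at h
            obtain ⟨ck, hck, hgk⟩ := ih _ v' hc
            obtain ⟨cr, hcr, hall⟩ := ihl k (s + v') t h
            refine ⟨cr + ck, ?_, ?_⟩
            · have he : (rest.length + 1) * pvBnd (pvW tr) f
                  = rest.length * pvBnd (pvW tr) f + pvBnd (pvW tr) f := by
                rw [Nat.succ_mul]
              simp only [List.length_cons, he]
              omega
            · intro total stack
              obtain ⟨p, hstep, hgr⟩ := hall total ((k ++ [pvChildName item]) :: stack)
              refine ⟨p, by simp [stepItems, hd, hstep], ?_⟩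
              intro m
              rw [Nat.add_assoc, hgr (ck + m), hgk m]
              have harith : total + (t - (s + v')) + v' = total + (t - s) := by ring
              rw [harith]
        · cases hp : pvParseItem item with
          | none => simp [pureItems, hd, hp] at h
          | some n =>
            simp only [pureItems, hd, hp, Bool.false_eq_true, if_false] at h
            obtain ⟨cr, hcr, hall⟩ := ihl k (s + n) t h
            refine ⟨cr, by simpa using Nat.le_trans hcr (by simp [Nat.succ_mul]), ?_⟩
            intro total stack
            obtain ⟨p, hstep, hgr⟩ := hall (total + n) stack
            refine ⟨p, by simp [stepItems, hd, hp, hstep], ?_⟩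
            intro m
            rw [hgr m]
            have harith : total + n + (t - (s + n)) = total + (t - s) := by ring
            rw [harith]
    intro k v h
    have hv : pureF sz tr (f+1) k = some v := h
    simp only [pureF] at h
    cases hsz : List.lookup k sz with
    | some v0 =>
      simp only [hsz, Option.some.injEq] at h
      subst h
      refine ⟨1, by simp [pvBnd], ?_⟩
      intro m total stack
      rw [show 1 + m = m + 1 by omega]
      simp [goB, hsz]
    | none =>
      simp only [hsz] at h
      cases htr : List.lookup k tr with
      | none => simp [htr] at h
      | some items =>
        simp only [htr] at h
        obtain ⟨c, hc, hall⟩ := hItems items k 0 v h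
        have hlen : items.length ≤ pvW tr :=
          Nat.le_trans (pvSumItems_le tr (pvLookup_mem htr)) (by simp [pvW])
        refine ⟨1 + c, ?_, ?_⟩
        · have : items.length * pvBnd (pvW tr) f ≤ pvW tr * pvBnd (pvW tr) f :=
            Nat.mul_le_mul_right _ hlen
          simp only [pvBnd]
          omega
        · intro m total stack
          obtain ⟨p, hstep, hg⟩ := hall total stack
          rw [show 1 + c + m = (c + m) + 1 by omega]
          have hg' := hg m
          have harith : total + (v - 0) = total + v := by ring
          rw [harith] at hg'
          simp [goB, hsz, htr, hstep, hg']

-- every reachable well-formed key has a pure value at fuel pvMaxKeyLen + 2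
theorem pure_suff (sz : List (List String × Int)) (tr : List (List String × List String)) (folder : List String)
    (hT : ∀ p ∈ tr, folder <+: p.1 → ∀ item ∈ p.2,
      (pvIsDir item = true → pvAdm sz tr (p.1 ++ [pvChildName item]) = true) ∧
      (pvIsDir item = false → (pvParseItem item).isSome = true)) :
    ∀ (f : Nat) (k : List String), folder <+: k → pvAdm sz tr k = true →
      pvMaxKeyLen tr + 2 ≤ f + k.length → 1 ≤ f → ∃ v, pureF sz tr f k = some v := by
  intro f
  induction f using Nat.strong_induction_on with
  | _ f ihf =>
    intro k hpre hadm hfuel hf1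
    obtain ⟨g, rfl⟩ : ∃ g, f = g + 1 := ⟨f - 1, by omega⟩
    cases hsz : List.lookup k sz with
    | some v => exact ⟨v, by simp [pureF, hsz]⟩
    | none =>
      have htr' : (List.lookup k tr).isSome = true := by
        unfold pvAdm at hadm
        simpa [hsz] using hadm
      obtain ⟨items, htr⟩ := Option.isSome_iff_exists.mp htr'
      have hmem := pvLookup_mem htr
      have hklen : k.length ≤ pvMaxKeyLen tr := pvMaxKeyLen_mem tr hmem
      have hitems := hT (k, items) hmem hpre
      have hinner : ∀ (its : List String), (∀ item ∈ its, item ∈ items) →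
          ∀ s : Int, ∃ t, pureItems sz tr g k its s = some t := by
        intro its
        induction its with
        | nil => intro _ s; exact ⟨s, by simp [pureItems]⟩
        | cons item rest ihl =>
          intro hsub s
          have hit := hitems item (hsub item (by simp))
          by_cases hd : pvIsDir item = true
          · have hadm' := hit.1 hd
            have hpre' : folder <+: k ++ [pvChildName item] := hpre.trans (List.prefix_append _ _)
            obtain ⟨v, hvc⟩ : ∃ v, pureF sz tr g (k ++ [pvChildName item]) = some v := by
              apply ihf g (by omega) _ hpre' hadm'
              · simp; omega
              · omega
            obtain ⟨t, ht⟩ := ihl (fun i hi => hsub i (by simp [hi])) (s + v)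
            exact ⟨t, by simp [pureItems, hd, hvc, ht]⟩
          · have hdf : pvIsDir item = false := by simpa using hd
            obtain ⟨n, hn⟩ := Option.isSome_iff_exists.mp (hit.2 hdf)
            obtain ⟨t, ht⟩ := ihl (fun i hi => hsub i (by simp [hi])) (s + n)
            exact ⟨t, by simp [pureItems, hd, hn, ht]⟩
      obtain ⟨t, ht⟩ := hinner items (fun _ h => h) 0
      exact ⟨t, by simp [pureF, hsz, htr, ht]⟩

-- ===== VERDICT (by name: the statement is the Claim_ definition above) =====
theorem folder_size_spec : Claim_equal_folder_size := by
  intro folder sz tr _ hPre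
  unfold Spec_folder_size
  have hpv : ∃ v, pureF sz tr (pvMaxKeyLen tr + 2) folder = some v := by
    rcases hPre with h | ⟨htr0, hOK⟩
    · obtain ⟨v, hv⟩ := Option.isSome_iff_exists.mp h
      obtain ⟨g, hg⟩ : ∃ g, pvMaxKeyLen tr + 2 = g + 1 := ⟨pvMaxKeyLen tr + 1, by omega⟩
      exact ⟨v, by rw [hg]; simp [pureF, hv]⟩
    · have hadm : pvAdm sz tr folder = true := by
        unfold pvAdm
        simp [htr0]
      exact pure_suff sz tr folder hOK (pvMaxKeyLen tr + 2) folder (List.prefix_refl folder) hadm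
        (by omega) (by omega)
  obtain ⟨v, hv⟩ := hpv
  have hFa : pvFaithful sz tr sz := by
    intro k w hk
    exact ⟨1, by simp [pureF, hk]⟩
  have hSu : pvSup sz sz := fun k w h => h
  obtain ⟨c', hgo, -, -⟩ := goA_pure sz tr (pvMaxKeyLen tr + 2) folder v sz hv hFa hSu
  obtain ⟨c, hcb, hgb⟩ := goB_pure sz tr (pvMaxKeyLen tr + 2) folder v hv
  have hBeq : goB sz tr (pvBnd (pvW tr) (pvMaxKeyLen tr + 2)) 0 [folder] = some v := by
    rw [show pvBnd (pvW tr) (pvMaxKeyLen tr + 2)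
          = c + (pvBnd (pvW tr) (pvMaxKeyLen tr + 2) - c) by omega]
    rw [hgb (pvBnd (pvW tr) (pvMaxKeyLen tr + 2) - c) 0 []]
    simp [goB]
  unfold folder_size folder_size_alt
  rw [hgo, hBeq]
  simp
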